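-- pv_equiv track=rewrite | github.com/DiegoValdez10/Corto-8-Paralela-y-Distribuida | estrellascorto8.py | worker_chunk
-- ===== SOURCE A (Python) =====
-- def worker_chunk(args):
--     """Procesa un bloque de filas [i_start, i_end)."""
--     foto, i_start, i_end = args
--     local_max = foto[i_start][0]
--     max_i, max_j = i_start, 0
--     for i in range(i_start, i_end):
--         for j, v in enumerate(foto[i]):
--             if v > local_max:
--                 local_max, max_i, max_j = v, i, j
--     return local_max, max_i, max_j
-- ===== SOURCE B (Python) =====
-- def worker_chunk(args):
--     """Procesa un bloque de filas [i_start, i_end)."""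
--     foto, i_start, i_end = args
--     cands = [(i,) + max(enumerate(foto[i]), key=lambda p: p[1])
--              for i in range(i_start, i_end) if foto[i]]
--     best = (foto[i_start][0], i_start, 0)
--     for i, j, v in cands:
--         if v > best[0]:
--             best = (v, i, j)
--     return best
-- ===== Notes on version B (the rewrite author's own statement) =====
-- stated objective: alternative
-- what changed: Replaces A's fused nested loop with a two-phase decomposition: first a comprehension maps each nonempty row to (row index, first argmax, row max) via max(enumerate(row), key=...), then a single fold over these per-row candidates picks the earliest strictly-greater one.
import Mathlib
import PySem

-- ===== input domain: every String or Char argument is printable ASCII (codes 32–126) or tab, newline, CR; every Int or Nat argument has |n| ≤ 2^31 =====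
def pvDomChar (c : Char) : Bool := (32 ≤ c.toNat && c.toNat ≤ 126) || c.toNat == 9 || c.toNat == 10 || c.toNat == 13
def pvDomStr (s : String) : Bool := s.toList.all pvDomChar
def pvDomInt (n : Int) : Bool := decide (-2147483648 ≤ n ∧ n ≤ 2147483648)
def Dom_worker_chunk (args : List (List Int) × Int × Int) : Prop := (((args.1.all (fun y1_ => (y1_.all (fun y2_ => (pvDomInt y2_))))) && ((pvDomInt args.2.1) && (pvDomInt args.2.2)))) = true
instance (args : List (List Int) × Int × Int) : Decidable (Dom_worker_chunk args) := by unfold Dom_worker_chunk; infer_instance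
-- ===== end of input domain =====

-- B replaces A's fused nested loop by a two-phase decomposition (per-row first-argmax, then one
-- combining pass); same cost, return value proved identical on Pre_.

-- ===== PORT A =====
def worker_chunk (args : List (List Int) × Int × Int) : Int × Int × Int :=
  let foto := args.1
  let i_start := args.2.1
  let i_end := args.2.2
  let local_max := PySem.List.pyGetD (PySem.List.pyGetD foto i_start []) 0 0
  (PySem.List.pyRange i_start i_end 1).foldl (fun st i =>
      (PySem.List.enumerate (PySem.List.pyGetD foto i []) 0).foldl
        (fun st jv => if jv.2 > st.1 then (jv.2, i, jv.1) else st) st)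
    (local_max, i_start, (0 : Int))

-- ===== PORT B =====
def worker_chunk_alt (args : List (List Int) × Int × Int) : Int × Int × Int :=
  let foto := args.1
  let i_start := args.2.1
  let i_end := args.2.2
  let cands : List (Int × Int × Int) :=
    (PySem.List.pyRange i_start i_end 1).foldl (fun acc i =>
        if PySem.List.pyGetD foto i [] ≠ [] then
          match PySem.List.max? (PySem.List.enumerate (PySem.List.pyGetD foto i []) 0)
              (fun p : Int × Int => p.2) with
          | some jv => acc ++ [(i, jv.1, jv.2)]
          | none => acc      -- unreachable: the row is nonempty here
        else acc) []
  let best0 := (PySem.List.pyGetD (PySem.List.pyGetD foto i_start []) 0 0, i_start, (0 : Int))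
  cands.foldl (fun b c => if c.2.2 > b.1 then (c.2.2, c.1, c.2.1) else b) best0

-- ===== PRECONDITION & SPEC =====
-- Pre_ excludes exactly the inputs where the Python raises IndexError: foto[i_start] must exist
-- (Python's negative-wrap rule), that row must be nonempty, and every loop index must be in range.
def Pre_worker_chunk (args : List (List Int) × Int × Int) : Prop :=
  PySem.Raise.InRange args.1.length args.2.1 ∧
  PySem.List.pyGetD args.1 args.2.1 [] ≠ [] ∧
  (args.2.1 < args.2.2 → args.2.2 ≤ (args.1.length : Int))
instance (args : List (List Int) × Int × Int) : Decidable (Pre_worker_chunk args) := by unfold Pre_worker_chunk; infer_instance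
def pvWitness_worker_chunk : (List (List Int) × Int × Int) := ([[1, 2], [3]], 0, 2)
def Spec_worker_chunk (args : List (List Int) × Int × Int) (out : Int × Int × Int) : Prop := out = worker_chunk_alt args
instance (args : List (List Int) × Int × Int) (out : Int × Int × Int) : Decidable (Spec_worker_chunk args out) := by unfold Spec_worker_chunk; infer_instance

-- ===== CLAIM (what is proved, stated in full; the proofs are below) =====
def Claim_equal_worker_chunk : Prop := ∀ (args : List (List Int) × Int × Int), Dom_worker_chunk args → Pre_worker_chunk args → Spec_worker_chunk args (worker_chunk args)

-- ===== LEMMAS AND PROOFS =====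

-- The step function of PySem.List.max? with key (·.2), named so it can be reasoned about.
def pvMStep (acc : Option (Int × Int)) (x : Int × Int) : Option (Int × Int) :=
  match acc with
  | none => some x
  | some m => if m.2 < x.2 then some x else some m

theorem pv_max?_eq_foldl (l : List (Int × Int)) :
    PySem.List.max? l (fun p : Int × Int => p.2) = l.foldl pvMStep none := by
  simp only [PySem.List.max?]
  congr 1
  funext acc x
  cases acc <;> rfl

-- folding the max?-step from `some m` instead of `none`.
theorem pv_mstep_some (t : List (Int × Int)) (m : Int × Int) :
    t.foldl pvMStep (some m)
    = some (match t.foldl pvMStep none with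
            | none => m
            | some p => if m.2 < p.2 then p else m) := by
  induction t generalizing m with
  | nil => rfl
  | cons q r ih =>
    rw [List.foldl_cons, List.foldl_cons]
    show r.foldl pvMStep (if m.2 < q.2 then some q else some m) = _
    show _ = some (match r.foldl pvMStep (some q) with
                   | none => m
                   | some p => if m.2 < p.2 then p else m)
    rw [ih q]
    by_cases hmq : m.2 < q.2
    · rw [if_pos hmq, ih q]
      rcases h : r.foldl pvMStep none with _ | p <;> simp only [] <;> split_ifs <;>
        simp_all <;> omega
    · rw [if_neg hmq, ih m]
      rcases h : r.foldl pvMStep none with _ | p <;> simp only [] <;> split_ifs <;>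
        simp_all <;> omega

-- A's inner row loop equals "take the first argmax of the row, then one strict comparison".
theorem pv_inner (l : List (Int × Int)) (i : Int) (st : Int × Int × Int) :
    l.foldl (fun st jv => if jv.2 > st.1 then (jv.2, i, jv.1) else st) st
    = match PySem.List.max? l (fun p : Int × Int => p.2) with
      | none => st
      | some p => if p.2 > st.1 then (p.2, i, p.1) else st := by
  rw [pv_max?_eq_foldl]
  induction l generalizing st with
  | nil => rfl
  | cons q t ih =>
    rw [List.foldl_cons, List.foldl_cons, ih]
    show (match t.foldl pvMStep none with
          | none => if q.2 > st.1 then (q.2, i, q.1) else st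
          | some p => if p.2 > (if q.2 > st.1 then (q.2, i, q.1) else st).1 then (p.2, i, p.1)
                      else if q.2 > st.1 then (q.2, i, q.1) else st)
        = _
    show _ = (match t.foldl pvMStep (some q) with
              | none => st
              | some p => if p.2 > st.1 then (p.2, i, p.1) else st)
    rw [pv_mstep_some t q]
    rcases h : t.foldl pvMStep none with _ | p <;> simp only [] <;> split_ifs <;>
      simp_all <;> omega

-- a nonempty row always yields a candidate
theorem pv_mstep_cons_isSome (q : Int × Int) (t : List (Int × Int)) :
    ∃ p, (q :: t).foldl pvMStep none = some p := by
  rw [List.foldl_cons]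
  show ∃ p, t.foldl pvMStep (some q) = some p
  rw [pv_mstep_some t q]
  exact ⟨_, rfl⟩

-- Folding B's candidate list equals running A's outer loop directly.
theorem pv_outer (foto : List (List Int)) (l : List Int)
    (acc : List (Int × Int × Int)) (st : Int × Int × Int) :
    (l.foldl (fun acc i =>
        if PySem.List.pyGetD foto i [] ≠ [] then
          match PySem.List.max? (PySem.List.enumerate (PySem.List.pyGetD foto i []) 0)
              (fun p : Int × Int => p.2) with
          | some jv => acc ++ [(i, jv.1, jv.2)]
          | none => acc
        else acc) acc).foldl
      (fun b c => if c.2.2 > b.1 then (c.2.2, c.1, c.2.1) else b) st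
    = l.foldl (fun st i =>
        (PySem.List.enumerate (PySem.List.pyGetD foto i []) 0).foldl
          (fun st jv => if jv.2 > st.1 then (jv.2, i, jv.1) else st) st)
      (acc.foldl (fun b c => if c.2.2 > b.1 then (c.2.2, c.1, c.2.1) else b) st) := by
  induction l generalizing acc st with
  | nil => simp
  | cons i t ih =>
    rw [List.foldl_cons, List.foldl_cons, ih]
    congr 1
    by_cases hrow : PySem.List.pyGetD foto i [] = []
    · simp [hrow]
    · rw [pv_inner]
      rcases hl : PySem.List.pyGetD foto i [] with _ | ⟨x, xs⟩
      · exact absurd hl hrow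
      · have henum : PySem.List.enumerate (x :: xs) 0 = (0, x) :: PySem.List.enumerate xs 1 := by
          simp [PySem.List.enumerate_cons]
        rw [henum]
        obtain ⟨p, hp⟩ := pv_mstep_cons_isSome (0, x) (PySem.List.enumerate xs 1)
        rw [pv_max?_eq_foldl, hp]
        simp [List.foldl_append]

-- ===== VERDICT (by name: the statement is the Claim_ definition above) =====
theorem worker_chunk_spec : Claim_equal_worker_chunk := by
  intro args _ _
  show worker_chunk args = worker_chunk_alt args
  unfold worker_chunk worker_chunk_alt
  rw [pv_outer]
  simp
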